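-- pv_equiv track=rewrite | github.com/dawson-teu/Competitive_Programming_Solutions | Contests/CCC/2009_J1_ISBN.py | one_three_sum
-- ===== SOURCE A (Python) =====
-- def one_three_sum(num):
--     one_three = 0
--     total = 0
--     for char in str(num):
--         if one_three % 2 == 0:
--             total += int(char)
--             one_three = 1
--         else:
--             total += 3 * int(char)
--             one_three = 0
--     return str(total)
-- ===== SOURCE B (Python) =====
-- def one_three_sum(num):
--     def go(s):
--         if s == "":
--             return 0
--         if len(s) == 1:
--             return int(s)
--         return int(s[0]) + 3 * int(s[1]) + go(s[2:])
--     return str(go(str(num)))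
-- ===== Notes on version B (the rewrite author's own statement) =====
-- stated objective: alternative
-- what changed: Replaced the stateful parity-toggle loop with a toggle-free recursion that consumes the digit string two characters at a time (1*first + 3*second per step).
import Mathlib
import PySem

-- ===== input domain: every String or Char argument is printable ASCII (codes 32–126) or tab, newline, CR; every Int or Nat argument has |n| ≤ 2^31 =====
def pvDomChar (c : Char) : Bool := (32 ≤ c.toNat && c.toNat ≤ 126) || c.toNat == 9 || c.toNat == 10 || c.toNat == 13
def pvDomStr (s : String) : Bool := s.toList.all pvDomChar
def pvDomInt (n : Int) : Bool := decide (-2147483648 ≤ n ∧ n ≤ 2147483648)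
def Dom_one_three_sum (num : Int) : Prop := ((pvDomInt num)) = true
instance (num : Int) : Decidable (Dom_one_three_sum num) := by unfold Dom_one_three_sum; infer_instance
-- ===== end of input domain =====

-- B replaces A's stateful parity-toggle loop by a toggle-free recursion consuming two digits per step (alternative decomposition, same cost).


-- ===== PORT A =====
-- int(char) on a single character; '.getD 0' is unreachable inside Pre_ (every char of str(num) is a digit for num ≥ 0)
def otsDigit (c : Char) : Int := (PySem.Int.ofChars? [c]).getD 0

def otsStep (st : Int × Int) (c : Char) : Int × Int :=
  if st.1 % 2 = 0 then (1, st.2 + otsDigit c)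
  else (0, st.2 + 3 * otsDigit c)

def one_three_sum (num : Int) : String :=
  PySem.Int.toStr (((PySem.Int.toChars num).foldl otsStep (0, 0)).2)

-- ===== PORT B =====
-- go(s): two characters per step, no parity state
def otsGo (cs : List Char) : Int :=
  match cs with
  | [] => 0
  | [c] => otsDigit c
  | a :: b :: rest => otsDigit a + 3 * otsDigit b + otsGo rest

def one_three_sum_alt (num : Int) : String :=
  PySem.Int.toStr (otsGo (PySem.Int.toChars num))

-- ===== PRECONDITION & SPEC =====
-- Pre_ excludes negative num, where str(num) starts with '-' and int('-') raises ValueError in both A and B.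
def Pre_one_three_sum (num : Int) : Prop := 0 ≤ num
instance (num : Int) : Decidable (Pre_one_three_sum num) := by unfold Pre_one_three_sum; infer_instance
def pvWitness_one_three_sum : Int := (12345)

def Spec_one_three_sum (num : Int) (out : String) : Prop := out = one_three_sum_alt num
instance (num : Int) (out : String) : Decidable (Spec_one_three_sum num out) := by unfold Spec_one_three_sum; infer_instance

-- ===== CLAIM (what is proved, stated in full; the proofs are below) =====
def Claim_equal_one_three_sum : Prop := ∀ (num : Int), Dom_one_three_sum num → Pre_one_three_sum num → Spec_one_three_sum num (one_three_sum num)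

-- ===== LEMMAS AND PROOFS =====
theorem otsFold_eq_go (cs : List Char) : ∀ (total : Int),
    (cs.foldl otsStep (0, total)).2 = total + otsGo cs := by
  induction cs using otsGo.induct with
  | case1 => intro total; simp [otsGo]
  | case2 c => intro total; simp [otsStep, otsGo, otsDigit]
  | case3 a b rest ih =>
      intro total
      simp only [List.foldl_cons, otsStep, otsGo]
      norm_num
      rw [ih]
      ring

-- ===== VERDICT (by name: the statement is the Claim_ definition above) =====
theorem one_three_sum_spec : Claim_equal_one_three_sum := by
  intro num _ _
  unfold Spec_one_three_sum one_three_sum one_three_sum_alt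
  rw [otsFold_eq_go]
  norm_num
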